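-- pv_equiv track=rewrite | github.com/eeue56/slack-today-i-did | parser.py | fill_in_the_gaps
-- ===== SOURCE A (Python) =====
-- def fill_in_the_gaps(message, tokens):
--     """
--         take things that look like [(12, FOR)] turn into [(12, FOR, noah)]
--     """
--
--     if len(tokens) < 1:
--         return []
--
--     if len(tokens) == 1:
--         start_index = tokens[0][0]
--         token = tokens[0][1]
--
--         return [ (start_index, token, message[start_index + len(token) + 1:]) ]
--
--     builds = []
--
--     for (i, (start_index, token)) in enumerate(tokens):
--         if i == len(tokens) - 1:
--             builds.append((start_index, token, message[start_index + len(token) + 1:]))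
--             continue
--
--
--         end_index = tokens[i + 1][0]
--         builds.append((start_index, token, message[start_index + len(token) + 1: end_index]))
--
--     return builds
-- ===== SOURCE B (Python) =====
-- def fill_in_the_gaps(message, tokens):
--     out = []
--     end = None
--     for start, token in reversed(tokens):
--         out.append((start, token, message[start + len(token) + 1:end]))
--         end = start
--     out.reverse()
--     return out
-- ===== Notes on version B (the rewrite author's own statement) =====
-- stated objective: alternative
-- what changed: Replaces A's forward index-based loop with its three special-case branches (empty, singleton, last-element lookahead via tokens[i+1]) by a single right-to-left pass that carries the current end boundary in an accumulator (initially None, updated to each token's start) and reverses the built list at the end.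
import Mathlib
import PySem

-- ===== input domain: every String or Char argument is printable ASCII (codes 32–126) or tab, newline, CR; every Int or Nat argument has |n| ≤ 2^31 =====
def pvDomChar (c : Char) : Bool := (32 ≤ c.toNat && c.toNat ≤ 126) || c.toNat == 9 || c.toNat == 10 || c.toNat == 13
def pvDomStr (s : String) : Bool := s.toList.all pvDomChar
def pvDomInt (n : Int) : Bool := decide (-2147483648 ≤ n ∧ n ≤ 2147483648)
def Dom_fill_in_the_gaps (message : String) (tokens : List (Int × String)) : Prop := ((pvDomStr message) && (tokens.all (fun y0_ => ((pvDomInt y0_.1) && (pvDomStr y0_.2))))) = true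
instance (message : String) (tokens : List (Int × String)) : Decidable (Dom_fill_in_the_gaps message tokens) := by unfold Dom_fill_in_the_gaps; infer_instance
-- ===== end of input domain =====

-- B builds the result back-to-front: one pass over the reversed token list carrying the
-- current end boundary in an accumulator (no successor lookup, no special-case branches),
-- then a final reverse — a different decomposition of the same O(n) task.

-- ===== PORT A =====
def fill_in_the_gaps (message : String) (tokens : List (Int × String)) : List (Int × String × String) :=
  if tokens.length < 1 then []
  else if tokens.length = 1 then
    match PySem.List.pyGet? tokens 0 with
    | some t =>
        let start_index := t.1
        let token := t.2
        [(start_index, token, PySem.Str.slice message (some (start_index + PySem.Str.len token + 1)) none)]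
    | none => []   -- unreachable: length = 1
  else
    (PySem.List.enumerate tokens 0).foldl (fun builds p =>
      let i := p.1
      let start_index := p.2.1
      let token := p.2.2
      if i = (tokens.length : Int) - 1 then
        builds ++ [(start_index, token, PySem.Str.slice message (some (start_index + PySem.Str.len token + 1)) none)]
      else
        match PySem.List.pyGet? tokens (i + 1) with
        | some nxt =>
            builds ++ [(start_index, token, PySem.Str.slice message (some (start_index + PySem.Str.len token + 1)) (some nxt.1))]
        | none => builds   -- unreachable: i + 1 in range
      ) []

-- ===== PORT B =====
-- one reverse pass: state = (out list so far, current end boundary), then reverse out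
def fill_in_the_gaps_alt (message : String) (tokens : List (Int × String)) : List (Int × String × String) :=
  let st := tokens.reverse.foldl
    (fun (st : List (Int × String × String) × Option Int) t =>
      (st.1 ++ [(t.1, t.2, PySem.Str.slice message (some (t.1 + PySem.Str.len t.2 + 1)) st.2)], some t.1))
    ([], none)
  st.1.reverse

-- ===== PRECONDITION & SPEC =====
def Spec_fill_in_the_gaps (message : String) (tokens : List (Int × String)) (out : List (Int × String × String)) : Prop := out = fill_in_the_gaps_alt message tokens
instance (message : String) (tokens : List (Int × String)) (out : List (Int × String × String)) : Decidable (Spec_fill_in_the_gaps message tokens out) := by unfold Spec_fill_in_the_gaps; infer_instance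

-- ===== CLAIM (what is proved, stated in full; the proofs are below) =====
def Claim_equal_fill_in_the_gaps : Prop := ∀ (message : String) (tokens : List (Int × String)), Dom_fill_in_the_gaps message tokens → Spec_fill_in_the_gaps message tokens (fill_in_the_gaps message tokens)

-- ===== LEMMAS AND PROOFS =====

-- one emitted triple
def pvGap (message : String) (t : Int × String) (e : Option Int) : Int × String × String :=
  (t.1, t.2, PySem.Str.slice message (some (t.1 + PySem.Str.len t.2 + 1)) e)

-- the end-boundary list of a suffix
def pvEnds (suf : List (Int × String)) : List (Option Int) :=
  (suf.drop 1).map (fun t => some t.1) ++ [none]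

-- B's fold over the reversed list, seen as a foldr, computes the zipped-gaps list reversed
lemma alt_foldr (message : String) (tokens : List (Int × String)) :
    tokens.foldr
      (fun t (st : List (Int × String × String) × Option Int) =>
        (st.1 ++ [(t.1, t.2, PySem.Str.slice message (some (t.1 + PySem.Str.len t.2 + 1)) st.2)], some t.1))
      ([], none)
    = (((tokens.zip (pvEnds tokens)).map (fun q => pvGap message q.1 q.2)).reverse,
       tokens.head?.map (fun t => t.1)) := by
  induction tokens with
  | nil => simp [pvEnds]
  | cons t rest ih =>
    rw [List.foldr_cons, ih]
    cases rest with
    | nil => simp [pvEnds, pvGap]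
    | cons t' rest' => simp [pvEnds, pvGap]

lemma alt_eq (message : String) (tokens : List (Int × String)) :
    fill_in_the_gaps_alt message tokens
      = (tokens.zip (pvEnds tokens)).map (fun q => pvGap message q.1 q.2) := by
  unfold fill_in_the_gaps_alt
  rw [List.foldl_reverse, alt_foldr]
  simp

-- the loop body of A
def pvBody (message : String) (tokens : List (Int × String))
    (builds : List (Int × String × String)) (p : Int × (Int × String)) :
    List (Int × String × String) :=
  if p.1 = (tokens.length : Int) - 1 then
    builds ++ [pvGap message p.2 none]
  else
    match PySem.List.pyGet? tokens (p.1 + 1) with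
    | some nxt => builds ++ [pvGap message p.2 (some nxt.1)]
    | none => builds

lemma loop_eq (message : String) (tokens : List (Int × String)) :
    ∀ (suf : List (Int × String)) (k : Nat) (acc : List (Int × String × String)),
      suf ≠ [] → tokens.drop k = suf → k + suf.length = tokens.length →
      (PySem.List.enumerate suf (k : Int)).foldl (pvBody message tokens) acc
        = acc ++ (suf.zip (pvEnds suf)).map (fun q => pvGap message q.1 q.2) := by
  intro suf
  induction suf with
  | nil => intro k acc h; exact absurd rfl h
  | cons t rest ih =>
    intro k acc _ hdrop hlen
    rw [PySem.List.enumerate_cons, List.foldl_cons]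
    cases rest with
    | nil =>
      have hk : (k : Int) = (tokens.length : Int) - 1 := by
        simp at hlen; omega
      simp [pvBody, hk, pvEnds, pvGap]
    | cons t' rest' =>
      have hk : ¬ ((k : Int) = (tokens.length : Int) - 1) := by
        simp at hlen; omega
      have hget : PySem.List.pyGet? tokens ((k : Int) + 1) = some t' := by
        have : ((k : Int) + 1) = ((k + 1 : Nat) : Int) := by push_cast; ring
        rw [this, PySem.List.pyGet?_natCast]
        have : tokens[k+1]? = (tokens.drop k)[1]? := by
          rw [List.getElem?_drop]
        rw [this, hdrop]
        rfl
      have hstep : pvBody message tokens acc ((k : Int), t) = acc ++ [pvGap message t (some t'.1)] := by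
        simp [pvBody, hk, hget]
      rw [hstep]
      have hdrop' : tokens.drop (k + 1) = t' :: rest' := by
        have h := (List.tail_drop (l := tokens) (i := k)).symm
        rw [hdrop] at h
        simpa using h
      have : ((k : Int) + 1) = ((k + 1 : Nat) : Int) := by push_cast; ring
      rw [this, ih (k + 1) (acc ++ [pvGap message t (some t'.1)]) (by simp) hdrop' (by simp at hlen ⊢; omega)]
      simp [pvEnds]

-- ===== VERDICT (by name: the statement is the Claim_ definition above) =====
theorem fill_in_the_gaps_spec : Claim_equal_fill_in_the_gaps := by
  intro message tokens _
  unfold Spec_fill_in_the_gaps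
  rw [alt_eq]
  match tokens with
  | [] => simp [fill_in_the_gaps]
  | [t] =>
    simp [fill_in_the_gaps, pvEnds, pvGap, PySem.List.pyGet?]
    rfl
  | t :: t' :: rest =>
    have hlen : ¬ ((t :: t' :: rest).length < 1) := by simp
    have hlen1 : ¬ ((t :: t' :: rest).length = 1) := by simp
    show fill_in_the_gaps message (t :: t' :: rest) = _
    unfold fill_in_the_gaps
    rw [if_neg hlen, if_neg hlen1]
    have h := loop_eq message (t :: t' :: rest) (t :: t' :: rest) 0 [] (by simp) (by simp) (by simp)
    simp only [Nat.cast_zero] at h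
    rw [show (fun (builds : List (Int × String × String)) (p : Int × (Int × String)) =>
          if p.1 = (((t :: t' :: rest).length : Nat) : Int) - 1 then
            builds ++ [(p.2.1, p.2.2, PySem.Str.slice message (some (p.2.1 + PySem.Str.len p.2.2 + 1)) none)]
          else
            match PySem.List.pyGet? (t :: t' :: rest) (p.1 + 1) with
            | some nxt => builds ++ [(p.2.1, p.2.2, PySem.Str.slice message (some (p.2.1 + PySem.Str.len p.2.2 + 1)) (some nxt.1))]
            | none => builds) = pvBody message (t :: t' :: rest) from rfl]
    rw [h]
    simp
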